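-- pv_equiv track=rewrite | github.com/GipDan/OCM | scripts/real_bench/benchmark_ops.py | split_requested_ops
-- ===== SOURCE A (Python) =====
-- def split_requested_ops(raw_ops: list[str]) -> list[str]:
--     tokens: list[str] = []
--     for raw in raw_ops:
--         for piece in raw.split(","):
--             value = piece.strip()
--             if value:
--                 tokens.append(value)
--     return tokens
-- ===== SOURCE B (Python) =====
-- def split_requested_ops(raw_ops: list[str]) -> list[str]:
--     # Character-level scanner: no split()/strip(); a comma (or end of an input
--     # string) flushes the current buffer, trimmed by moving two indices inward.
--     tokens: list[str] = []
--     buf: list[str] = []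
--
--     def flush() -> None:
--         i = 0
--         j = len(buf)
--         while i < j and buf[i].isspace():
--             i += 1
--         while j > i and buf[j - 1].isspace():
--             j -= 1
--         if i < j:
--             tokens.append(''.join(buf[i:j]))
--         del buf[:]
--
--     for raw in raw_ops:
--         for ch in raw:
--             if ch == ',':
--                 flush()
--             else:
--                 buf.append(ch)
--         flush()
--     return tokens
-- ===== Notes on version B (the rewrite author's own statement) =====
-- stated objective: alternative
-- what changed: Replaces A's split(',')+strip()+filter over each element with a character-level scanner: one state machine over every character that buffers non-comma characters and, on each comma or end of an element, emits the buffer trimmed by two inward-moving indices.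
import Mathlib
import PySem

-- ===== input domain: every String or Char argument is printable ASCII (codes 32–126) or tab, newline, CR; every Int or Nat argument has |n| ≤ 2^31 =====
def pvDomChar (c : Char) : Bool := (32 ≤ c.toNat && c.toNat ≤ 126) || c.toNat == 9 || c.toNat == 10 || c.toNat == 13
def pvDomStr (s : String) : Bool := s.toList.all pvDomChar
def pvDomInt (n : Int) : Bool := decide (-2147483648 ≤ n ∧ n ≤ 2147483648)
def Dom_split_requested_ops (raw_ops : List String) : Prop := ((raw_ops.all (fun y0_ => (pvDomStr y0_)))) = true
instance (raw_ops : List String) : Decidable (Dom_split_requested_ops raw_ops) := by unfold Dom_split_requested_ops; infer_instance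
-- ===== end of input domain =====

-- B replaces A's split/strip/filter with a character-level scanner state machine (alternative decomposition; same result).

-- ===== PORT A =====
-- raw.split(",") with the nonempty literal separator: split? always returns some here.
def pySplitComma (s : String) : List String := (PySem.Str.split? s ",").getD []

def split_requested_ops (raw_ops : List String) : List String :=
  raw_ops.foldl (fun tokens raw =>
    (pySplitComma raw).foldl (fun tokens piece =>
      let value := PySem.Str.strip piece
      if value ≠ "" then tokens ++ [value] else tokens) tokens) []

-- ===== PORT B =====
-- flush(): Source B's two index-while loops move i past leading isspace chars and j
-- back past trailing ones; buf[i:j] is exactly dropWhile-isspace from the front,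
-- then dropWhile-isspace from the back (via reverse). Emits it if nonempty.
def pvFlush (buf : List Char) (tokens : List String) : List String :=
  let core := ((buf.dropWhile PySem.Chars.isspace).reverse.dropWhile PySem.Chars.isspace).reverse
  if core ≠ [] then tokens ++ [String.ofList core] else tokens

-- the inner character loop: a comma flushes the buffer, any other char is buffered
def pvScan (buf : List Char) (tokens : List String) : List Char → List Char × List String
  | [] => (buf, tokens)
  | c :: rest =>
      if c = ',' then pvScan [] (pvFlush buf tokens) rest
      else pvScan (buf ++ [c]) tokens rest

def split_requested_ops_alt (raw_ops : List String) : List String :=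
  (raw_ops.foldl (fun st raw =>
      let st2 := pvScan st.1 st.2 raw.toList
      (([] : List Char), pvFlush st2.1 st2.2))
    (([] : List Char), ([] : List String))).2

-- ===== PRECONDITION & SPEC =====
def Spec_split_requested_ops (raw_ops : List String) (out : List String) : Prop := out = split_requested_ops_alt raw_ops
instance (raw_ops : List String) (out : List String) : Decidable (Spec_split_requested_ops raw_ops out) := by unfold Spec_split_requested_ops; infer_instance

-- ===== CLAIM (what is proved, stated in full; the proofs are below) =====
def Claim_equal_split_requested_ops : Prop := ∀ (raw_ops : List String), Dom_split_requested_ops raw_ops → Spec_split_requested_ops raw_ops (split_requested_ops raw_ops)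

-- ===== LEMMAS AND PROOFS =====

-- structural comma splitter used to reason about PySem.Chars.splitOn with sep = [',']
def mySplit (cur : List Char) : List Char → List (List Char)
  | [] => [cur]
  | c :: rest => if c = ',' then cur :: mySplit [] rest else mySplit (cur ++ [c]) rest

theorem go_step (n : Nat) (c : Char) (rest cur : List Char) (accs : List (List Char)) :
    PySem.Chars.splitOn.go [','] (n+1) (c :: rest) cur accs =
      if List.isPrefixOf [','] (c :: rest)
      then PySem.Chars.splitOn.go [','] n ((c :: rest).drop 1) [] (cur.reverse :: accs)
      else PySem.Chars.splitOn.go [','] n rest (c :: cur) accs := rfl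

theorem go_eq_mySplit (fuel : Nat) : ∀ (l cur : List Char) (accs : List (List Char)),
    l.length < fuel →
    PySem.Chars.splitOn.go [','] fuel l cur accs = accs.reverse ++ mySplit cur.reverse l := by
  induction fuel with
  | zero => intro l cur accs h; omega
  | succ n ih =>
    intro l cur accs h
    cases l with
    | nil => simp [PySem.Chars.splitOn.go, mySplit]
    | cons c rest =>
      by_cases hc : c = ','
      · subst hc
        have hpre : List.isPrefixOf [','] (',' :: rest) = true := by simp [List.isPrefixOf]
        rw [go_step, if_pos hpre, List.drop_one, List.tail_cons]
        rw [ih rest [] (cur.reverse :: accs) (by simp at h; omega)]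
        simp [mySplit]
      · have hpre : List.isPrefixOf [','] (c :: rest) = false := by
          show ((',' == c) && List.isPrefixOf [] rest) = false
          simp [Ne.symm hc]
        rw [go_step, if_neg (by simp [hpre])]
        rw [ih rest (c :: cur) accs (by simp at h; omega)]
        simp [mySplit, hc]

theorem splitOn_eq_mySplit (l : List Char) :
    PySem.Chars.splitOn l [','] = mySplit [] l := by
  have := go_eq_mySplit (l.length + 1) l [] [] (by omega)
  simpa [PySem.Chars.splitOn] using this

theorem pySplitComma_eq (s : String) :
    pySplitComma s = (mySplit [] s.toList).map String.ofList := by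
  simp [pySplitComma, PySem.Str.split?, PySem.Chars.split?, splitOn_eq_mySplit]

-- what the scanner emits for one trimmed piece
def emitPiece (p : List Char) : List String :=
  if PySem.Chars.strip p ≠ [] then [String.ofList (PySem.Chars.strip p)] else []

theorem pvFlush_eq (buf : List Char) (tokens : List String) :
    pvFlush buf tokens = tokens ++ emitPiece buf := by
  unfold pvFlush emitPiece PySem.Chars.strip PySem.Chars.lstrip PySem.Chars.rstrip
  split_ifs with h1 h2 h2 <;> simp_all

-- the scanner followed by a final flush = flush of every comma-piece in order
theorem scan_flush_eq (l : List Char) : ∀ (buf : List Char) (tokens : List String),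
    pvFlush (pvScan buf tokens l).1 (pvScan buf tokens l).2
      = tokens ++ (mySplit buf l).flatMap emitPiece := by
  induction l with
  | nil => intro buf tokens; simp [pvScan, mySplit, pvFlush_eq]
  | cons c rest ih =>
    intro buf tokens
    by_cases hc : c = ','
    · subst hc
      simp only [pvScan, mySplit, ite_true, if_pos]
      rw [ih, pvFlush_eq]
      simp
    · simp only [pvScan, if_neg hc, mySplit, if_neg hc]
      exact ih (buf ++ [c]) tokens

-- B's outer fold, with the buffer always empty between elements
theorem B_foldl (raw_ops : List String) : ∀ (tokens : List String),
    raw_ops.foldl (fun st raw =>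
        let st2 := pvScan st.1 st.2 raw.toList
        (([] : List Char), pvFlush st2.1 st2.2))
      (([] : List Char), tokens)
      = ([], tokens ++ raw_ops.flatMap (fun s => (mySplit [] s.toList).flatMap emitPiece)) := by
  induction raw_ops with
  | nil => intro tokens; simp
  | cons r rest ih =>
    intro tokens
    rw [List.foldl_cons]
    show rest.foldl _ ([], pvFlush (pvScan [] tokens r.toList).1 (pvScan [] tokens r.toList).2) = _
    rw [scan_flush_eq, ih]
    simp

-- A's inner fold as map/filter over the pieces of one element
theorem foldl_inner (xs : List String) : ∀ (tokens : List String),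
    xs.foldl (fun tokens piece =>
      let value := PySem.Str.strip piece
      if value ≠ "" then tokens ++ [value] else tokens) tokens
    = tokens ++ (xs.map PySem.Str.strip).filter (fun v => v ≠ "") := by
  induction xs with
  | nil => intro tokens; simp
  | cons p rest ih =>
    intro tokens
    rw [List.foldl_cons, ih]
    by_cases hp : PySem.Str.strip p = "" <;> simp [hp]

theorem A_eq_flat (raw_ops : List String) : ∀ (tokens : List String),
    raw_ops.foldl (fun tokens raw =>
      (pySplitComma raw).foldl (fun tokens piece =>
        let value := PySem.Str.strip piece
        if value ≠ "" then tokens ++ [value] else tokens) tokens) tokens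
    = tokens ++ raw_ops.flatMap (fun raw => ((pySplitComma raw).map PySem.Str.strip).filter (fun v => v ≠ "")) := by
  induction raw_ops with
  | nil => intro tokens; simp
  | cons r rest ih =>
    intro tokens
    rw [List.foldl_cons, foldl_inner, ih]
    simp

-- per-piece agreement: Python strip on a rebuilt string = Chars.strip on the piece
theorem strip_ofList (p : List Char) :
    PySem.Str.strip (String.ofList p) = String.ofList (PySem.Chars.strip p) := by
  apply String.toList_injective
  simpa using PySem.Str.toList_strip (String.ofList p)

theorem ofList_ne_empty_iff (l : List Char) : (String.ofList l ≠ "") ↔ l ≠ [] := by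
  have h : String.ofList l = "" ↔ l = [] := by
    constructor
    · intro h; have := congrArg String.toList h; simpa using this
    · intro h; subst h; rfl
  exact not_congr h

theorem elem_agree (s : String) :
    ((pySplitComma s).map PySem.Str.strip).filter (fun v => v ≠ "")
      = (mySplit [] s.toList).flatMap emitPiece := by
  rw [pySplitComma_eq]
  induction mySplit [] s.toList with
  | nil => simp
  | cons p rest ih =>
    simp only [List.map_cons, List.flatMap_cons, List.filter_cons]
    rw [ih]
    unfold emitPiece
    by_cases h : PySem.Chars.strip p = []
    · simp [strip_ofList, h]
    · have hne : String.ofList (PySem.Chars.strip p) ≠ "" := (ofList_ne_empty_iff _).mpr h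
      simp [strip_ofList, h, hne]

-- ===== VERDICT =====
theorem split_requested_ops_spec : Claim_equal_split_requested_ops := by
  intro raw_ops _
  unfold Spec_split_requested_ops split_requested_ops split_requested_ops_alt
  rw [A_eq_flat, B_foldl]
  simp only [List.nil_append]
  congr 1
  funext s
  exact elem_agree s
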